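-- pv_equiv track=rewrite | github.com/Devpatel1012/Leetcode-Solved-Problems | Maximum Square Area by Removing Fences From a Field.py | maximizeSquareArea
-- ===== SOURCE A (Python) =====
-- def maximizeSquareArea(m, n, hFences, vFences):
--     """
--     :type m: int
--     :type n: int
--     :type hFences: List[int]
--     :type vFences: List[int]
--     :rtype: int
--     """
--     hFences.extend([1,m])
--     vFences.extend([1,n])
--
--     ans = 0
--     dist  = set()
--     for i in range(len(hFences)):
--         for j in range(i+1,len(hFences)):
--             dist.add(abs(hFences[j]-hFences[i]))
--
--     for i in range(len(vFences)):
--         for j in range(i+1,len(vFences)):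
--             val = abs(vFences[j]-vFences[i])
--             if val in dist:
--                 ans = max(ans,val)
--
--     if ans == 0:
--         return -1
--     return (ans*ans)%(10**9+7)
-- ===== SOURCE B (Python) =====
-- def maximizeSquareArea(m, n, hFences, vFences):
--     hFences.extend([1, m])
--     vFences.extend([1, n])
--
--     def gaps_desc(xs):
--         out = []
--         for i, a in enumerate(xs):
--             for b in xs[i + 1:]:
--                 out.append(abs(a - b))
--         return sorted(set(out), reverse=True)
--
--     hg = gaps_desc(hFences)
--     vg = gaps_desc(vFences)
--     i = j = 0
--     ans = 0
--     while i < len(hg) and j < len(vg):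
--         if hg[i] == vg[j]:
--             ans = hg[i]
--             break
--         if hg[i] > vg[j]:
--             i += 1
--         else:
--             j += 1
--     return -1 if ans == 0 else ans * ans % (10 ** 9 + 7)
-- ===== Notes on version B (the rewrite author's own statement) =====
-- stated objective: alternative
-- what changed: Finds the largest common gap by sorting the deduplicated gap lists of each axis in descending order and running a two-pointer merge scan that stops at the first (hence largest) common element, instead of A's hash-set membership test with a running max inside the nested vertical loop.
import Mathlib
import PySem

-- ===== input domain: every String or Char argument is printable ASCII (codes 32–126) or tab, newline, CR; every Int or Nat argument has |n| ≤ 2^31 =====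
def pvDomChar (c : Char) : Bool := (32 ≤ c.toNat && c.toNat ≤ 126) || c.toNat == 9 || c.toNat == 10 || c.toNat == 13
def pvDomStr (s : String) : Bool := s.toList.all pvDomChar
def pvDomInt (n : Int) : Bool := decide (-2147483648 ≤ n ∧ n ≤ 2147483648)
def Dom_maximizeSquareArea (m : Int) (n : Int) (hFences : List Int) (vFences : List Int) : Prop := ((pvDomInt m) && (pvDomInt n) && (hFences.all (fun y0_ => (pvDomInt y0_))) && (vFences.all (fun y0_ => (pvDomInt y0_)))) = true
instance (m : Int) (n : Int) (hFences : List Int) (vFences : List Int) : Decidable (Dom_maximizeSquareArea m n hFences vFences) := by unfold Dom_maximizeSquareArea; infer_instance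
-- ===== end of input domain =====

-- B finds the largest common gap by sorting both pairwise-gap lists in descending order and
-- running a two-pointer scan that stops at the first common element, instead of A's hash-set
-- membership test with a running max — objective: alternative. Both A and B extend the
-- argument lists hFences/vFences in place identically; the theorems are about the return value.

-- ===== PORT A =====
def maximizeSquareArea (m : Int) (n : Int) (hFences : List Int) (vFences : List Int) : Int :=
  let hs := hFences ++ [1, m]
  let vs := vFences ++ [1, n]
  let dist : PySem.Set Int :=
    (PySem.List.pyRange 0 (hs.length : Int)).foldl (fun d i =>
      (PySem.List.pyRange (i + 1) (hs.length : Int)).foldl (fun d j =>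
        PySem.Set.add d (|PySem.List.pyGetD hs j 0 - PySem.List.pyGetD hs i 0|)) d)
      PySem.Set.empty
  let ans : Int :=
    (PySem.List.pyRange 0 (vs.length : Int)).foldl (fun a i =>
      (PySem.List.pyRange (i + 1) (vs.length : Int)).foldl (fun a j =>
        let val := |PySem.List.pyGetD vs j 0 - PySem.List.pyGetD vs i 0|
        if PySem.Set.contains dist val then max a val else a) a)
      0
  if ans = 0 then -1 else PySem.Int.mod (ans * ans) (10 ^ 9 + 7)

-- ===== PORT B =====
-- gaps_desc: append |a-b| for i,a in enumerate(xs), b in xs[i+1:], then sorted(set(out), reverse=True)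
def pvGapsDesc (xs : List Int) : List Int :=
  PySem.List.sorted (PySem.Set.ofList ((PySem.List.enumerate xs).flatMap (fun p =>
    (PySem.List.slice xs (some (p.1 + 1)) none).map (fun b => |p.2 - b|)))) (fun x => x) true

-- the while-loop with two indices i,j over hg,vg, transcribed as recursion on the suffixes
def pvTP : List Int → List Int → Int
  | [], _ => 0
  | _ :: _, [] => 0
  | a :: t1, b :: t2 =>
    if a = b then a
    else if a > b then pvTP t1 (b :: t2)
    else pvTP (a :: t1) t2
termination_by l1 l2 => l1.length + l2.length

def maximizeSquareArea_alt (m : Int) (n : Int) (hFences : List Int) (vFences : List Int) : Int :=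
  let hs := hFences ++ [1, m]
  let vs := vFences ++ [1, n]
  let hg := pvGapsDesc hs
  let vg := pvGapsDesc vs
  let ans := pvTP hg vg
  if ans = 0 then -1 else PySem.Int.mod (ans * ans) (10 ^ 9 + 7)

-- ===== PRECONDITION & SPEC =====
def Spec_maximizeSquareArea (m : Int) (n : Int) (hFences : List Int) (vFences : List Int) (out : Int) : Prop := out = maximizeSquareArea_alt m n hFences vFences
instance (m : Int) (n : Int) (hFences : List Int) (vFences : List Int) (out : Int) : Decidable (Spec_maximizeSquareArea m n hFences vFences out) := by unfold Spec_maximizeSquareArea; infer_instance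

-- ===== CLAIM (what is proved, stated in full; the proofs are below) =====
def Claim_equal_maximizeSquareArea : Prop := ∀ (m : Int) (n : Int) (hFences : List Int) (vFences : List Int), Dom_maximizeSquareArea m n hFences vFences → Spec_maximizeSquareArea m n hFences vFences (maximizeSquareArea m n hFences vFences)

-- ===== LEMMAS AND PROOFS =====

-- canonical list of all pairwise absolute gaps, in the generation order of both programs
def pdiffs : List Int → List Int
  | [] => []
  | x :: t => t.map (fun b => |x - b|) ++ pdiffs t

-- A's nested index loop over all pairs i < j is a fold of g over pdiffs
theorem pairFold {β : Type} (g : β → Int → β) (xs : List Int) (s : β) :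
    (PySem.List.pyRange 0 (xs.length : Int)).foldl (fun d i =>
      (PySem.List.pyRange (i + 1) (xs.length : Int)).foldl (fun d j =>
        g d (|PySem.List.pyGetD xs j 0 - PySem.List.pyGetD xs i 0|)) d) s
    = (pdiffs xs).foldl g s := by
  induction xs generalizing s with
  | nil =>
    rw [show ((List.length ([] : List Int) : Int)) = ((0 : Nat) : Int) from rfl,
        PySem.List.pyRange_zero_nat]
    simp [pdiffs]
  | cons x t ih =>
    have h0 : ∀ (d : β),
        (PySem.List.pyRange ((0 : Int) + 1) ((t.length + 1 : Nat) : Int)).foldl (fun d j =>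
          g d (|PySem.List.pyGetD (x :: t) j 0 - PySem.List.pyGetD (x :: t) 0 0|)) d
        = ((t.map (fun b => |x - b|))).foldl g d := by
      intro d
      show (PySem.List.pyRange ((0 : Int) + 1) (((x :: t).length : Nat) : Int)).foldl (fun d j =>
          g d (|PySem.List.pyGetD (x :: t) j 0 - PySem.List.pyGetD (x :: t) 0 0|)) d
        = ((t.map (fun b => |x - b|))).foldl g d
      rw [PySem.List.foldl_pyRange_pyGetD' (x :: t) 0
            (fun d b => g d (|b - PySem.List.pyGetD (x :: t) 0 0|)) d (by norm_num),
          List.foldl_map]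
      have hx : PySem.List.pyGetD (x :: t) 0 0 = x := by
        simp
      simp [hx, abs_sub_comm]
    have hstep : ∀ (d : β) (k : Nat),
        (PySem.List.pyRange (((k + 1 : Nat) : Int) + 1) ((t.length + 1 : Nat) : Int)).foldl
          (fun d j => g d (|PySem.List.pyGetD (x :: t) j 0
                            - PySem.List.pyGetD (x :: t) ((k + 1 : Nat) : Int) 0|)) d
        = (PySem.List.pyRange (((k : Nat) : Int) + 1) ((t.length : Nat) : Int)).foldl
          (fun d j => g d (|PySem.List.pyGetD t j 0 - PySem.List.pyGetD t ((k : Nat) : Int) 0|)) d := by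
      intro d k
      show (PySem.List.pyRange (((k + 1 : Nat) : Int) + 1) (((x :: t).length : Nat) : Int)).foldl
          (fun d j => g d (|PySem.List.pyGetD (x :: t) j 0
                            - PySem.List.pyGetD (x :: t) ((k + 1 : Nat) : Int) 0|)) d
        = (PySem.List.pyRange (((k : Nat) : Int) + 1) ((t.length : Nat) : Int)).foldl
          (fun d j => g d (|PySem.List.pyGetD t j 0 - PySem.List.pyGetD t ((k : Nat) : Int) 0|)) d
      rw [PySem.List.foldl_pyRange_pyGetD' (x :: t) 0
            (fun d b => g d (|b - PySem.List.pyGetD (x :: t) ((k + 1 : Nat) : Int) 0|)) d (by positivity),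
          PySem.List.foldl_pyRange_pyGetD' t 0
            (fun d b => g d (|b - PySem.List.pyGetD t ((k : Nat) : Int) 0|)) d (by positivity)]
      have hidx : PySem.List.pyGetD (x :: t) ((k + 1 : Nat) : Int) 0 = PySem.List.pyGetD t ((k : Nat) : Int) 0 := by
        rw [PySem.List.pyGetD_natCast, PySem.List.pyGetD_natCast]
        simp
      have hdrop : ((((k + 1 : Nat) : Int)) + 1).toNat = k + 2 := by omega
      have hdrop' : ((((k : Nat) : Int)) + 1).toNat = k + 1 := by omega
      rw [hidx, hdrop, hdrop']
      simp [List.drop_succ_cons]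
    rw [show (((x :: t).length : Nat) : Int) = ((t.length + 1 : Nat) : Int) from rfl,
        PySem.List.pyRange_zero_nat, List.foldl_map, List.range_succ_eq_map,
        List.foldl_cons, List.foldl_map]
    simp only [Nat.cast_zero]
    rw [h0 s]
    have hfun : (fun (d : β) (k : Nat) =>
        (PySem.List.pyRange (((Nat.succ k : Nat) : Int) + 1) ((t.length + 1 : Nat) : Int)).foldl
          (fun d j => g d (|PySem.List.pyGetD (x :: t) j 0
                            - PySem.List.pyGetD (x :: t) ((Nat.succ k : Nat) : Int) 0|)) d)
        = (fun (d : β) (k : Nat) =>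
        (PySem.List.pyRange (((k : Nat) : Int) + 1) ((t.length : Nat) : Int)).foldl
          (fun d j => g d (|PySem.List.pyGetD t j 0 - PySem.List.pyGetD t ((k : Nat) : Int) 0|)) d) := by
      funext d k
      exact hstep d k
    have ihr : ∀ (s' : β),
        (List.range t.length).foldl (fun d k =>
          (PySem.List.pyRange (((k : Nat) : Int) + 1) ((t.length : Nat) : Int)).foldl
            (fun d j => g d (|PySem.List.pyGetD t j 0 - PySem.List.pyGetD t ((k : Nat) : Int) 0|)) d) s'
        = (pdiffs t).foldl g s' := by
      intro s'
      have h := ih s'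
      rw [PySem.List.pyRange_zero_nat, List.foldl_map] at h
      exact h
    rw [hfun, ihr]
    simp [pdiffs]

-- B's nested append loop over enumerate-and-slice produces exactly pdiffs (of the suffix)
theorem gapsAux (full : List Int) (t : List Int) (k : Nat) (h : full.drop k = t) :
    (PySem.List.enumerate t ((k : Nat) : Int)).flatMap (fun p =>
      (PySem.List.slice full (some (p.1 + 1)) none).map (fun b => |p.2 - b|)) = pdiffs t := by
  induction t generalizing k with
  | nil => simp [pdiffs]
  | cons x t' ih =>
    rw [PySem.List.enumerate_cons, List.flatMap_cons]
    dsimp only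
    have hcast : (((k : Nat) : Int)) + 1 = (((k + 1 : Nat)) : Int) := by push_cast; ring
    have hdrop : full.drop (k + 1) = t' := by
      rw [← List.tail_drop, h]
      rfl
    have hslice : PySem.List.slice full (some (((k : Nat) : Int) + 1)) none = t' := by
      rw [hcast, PySem.List.slice_from_natCast, hdrop]
    rw [hslice, hcast, ih (k + 1) hdrop]
    simp [pdiffs]

theorem gapsDesc_eq (xs : List Int) :
    pvGapsDesc xs = PySem.List.sorted (PySem.Set.ofList (pdiffs xs)) (fun x => x) true := by
  unfold pvGapsDesc
  rw [show (0 : Int) = ((0 : Nat) : Int) from rfl, gapsAux xs xs 0 (by simp)]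

theorem pdiffs_nonneg (xs : List Int) : ∀ x ∈ pdiffs xs, 0 ≤ x := by
  induction xs with
  | nil => simp [pdiffs]
  | cons y t ih =>
    intro x hx
    simp only [pdiffs, List.mem_append, List.mem_map] at hx
    rcases hx with ⟨b, _, rfl⟩ | hx
    · exact abs_nonneg _
    · exact ih x hx

theorem foldl_if_max {p : Int → Bool} (L : List Int) (a : Int) :
    L.foldl (fun a v => if p v then max a v else a) a = (L.filter p).foldl max a := by
  induction L generalizing a with
  | nil => rfl
  | cons x t ih =>
    by_cases h : p x <;> simp [h, ih]

theorem foldl_max_mem_congr (M₁ M₂ : List Int) (h : ∀ x, x ∈ M₁ ↔ x ∈ M₂) (a : Int) :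
    M₁.foldl max a = M₂.foldl max a := by
  have key : ∀ (P Q : List Int), (∀ x, x ∈ P → x ∈ Q) → P.foldl max a ≤ Q.foldl max a := by
    intro P Q hPQ
    rcases PySem.List.foldl_max_mem P a with h1 | h1
    · rw [h1]; exact (PySem.List.le_foldl_max Q a).1
    · exact (PySem.List.le_foldl_max Q a).2 _ (hPQ _ h1)
  exact le_antisymm (key M₁ M₂ fun x hx => (h x).mp hx) (key M₂ M₁ fun x hx => (h x).mpr hx)

theorem foldl_max_of_le (L : List Int) (a : Int) (h : ∀ x ∈ L, x ≤ a) :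
    L.foldl max a = a := by
  induction L with
  | nil => rfl
  | cons x t ih =>
    have hx : max a x = a := max_eq_left (h x (by simp))
    simp only [List.foldl_cons, hx]
    exact ih fun y hy => h y (by simp [hy])

-- two-pointer scan over descending lists = running max over the common elements
theorem tp_correct (L1 L2 : List Int) (h1 : L1.Pairwise (fun a b => b ≤ a))
    (h2 : L2.Pairwise (fun a b => b ≤ a)) (hn : ∀ x ∈ L1, 0 ≤ x) :
    pvTP L1 L2 = (L1.filter (fun x => decide (x ∈ L2))).foldl max 0 := by
  induction L1 generalizing L2 with
  | nil => simp [pvTP]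
  | cons a t1 ih1 =>
    induction L2 with
    | nil => simp [pvTP]
    | cons b t2 ih2 =>
      by_cases hab : a = b
      · subst hab
        rw [pvTP, if_pos rfl]
        have hmem : decide (a ∈ a :: t2) = true := by simp
        rw [List.filter_cons, if_pos hmem, List.foldl_cons,
            max_eq_right (hn a (by simp))]
        refine (foldl_max_of_le _ _ ?_).symm
        intro x hx
        have hx' : x ∈ t1 := List.mem_of_mem_filter hx
        exact (List.pairwise_cons.mp h1).1 x hx'
      · by_cases hgt : a > b
        · -- a > b: a is larger than everything in b :: t2, drop a
          rw [pvTP, if_neg hab, if_pos hgt]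
          have hnot : a ∉ b :: t2 := by
            intro hmem
            rcases List.mem_cons.mp hmem with rfl | hmem'
            · exact hab rfl
            · exact absurd ((List.pairwise_cons.mp h2).1 a hmem') (by omega)
          rw [List.filter_cons, if_neg (by simpa using hnot)]
          exact ih1 (b :: t2) (List.pairwise_cons.mp h1).2 h2
            (fun x hx => hn x (by simp [hx]))
        · -- a < b: b is larger than everything in a :: t1, drop b
          have hlt : a < b := by omega
          rw [pvTP, if_neg hab, if_neg hgt]
          have hfc : (a :: t1).filter (fun x => decide (x ∈ b :: t2))
              = (a :: t1).filter (fun x => decide (x ∈ t2)) := by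
            apply List.filter_congr
            intro x hx
            have hxb : x ≠ b := by
              rcases List.mem_cons.mp hx with rfl | hx'
              · omega
              · have := (List.pairwise_cons.mp h1).1 x hx'
                omega
            simp [List.mem_cons, hxb]
          rw [hfc]
          exact ih2 (List.pairwise_cons.mp h2).2

-- ===== VERDICT (by name: the statement is the Claim_ definition above) =====
theorem maximizeSquareArea_spec : Claim_equal_maximizeSquareArea := by
  intro m n hFences vFences _
  unfold Spec_maximizeSquareArea maximizeSquareArea maximizeSquareArea_alt
  dsimp only
  set hs := hFences ++ [1, m] with hhs
  set vs := vFences ++ [1, n] with hvs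
  rw [pairFold PySem.Set.add hs PySem.Set.empty,
      show (PySem.Set.empty : PySem.Set Int) = [] from rfl,
      ← PySem.Set.ofList_eq_foldl (pdiffs hs)]
  set H := PySem.Set.ofList (pdiffs hs) with hH
  rw [pairFold (fun a v => if PySem.Set.contains H v then max a v else a) vs 0,
      gapsDesc_eq, gapsDesc_eq]
  set hg := PySem.List.sorted (PySem.Set.ofList (pdiffs hs)) (fun x => x) true with hhg
  set vg := PySem.List.sorted (PySem.Set.ofList (pdiffs vs)) (fun x => x) true with hvg
  have hmem_hg : ∀ x : Int, x ∈ hg ↔ x ∈ pdiffs hs := fun x => by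
    rw [hhg, PySem.List.mem_sorted, PySem.Set.mem_ofList]
  have hmem_vg : ∀ x : Int, x ∈ vg ↔ x ∈ pdiffs vs := fun x => by
    rw [hvg, PySem.List.mem_sorted, PySem.Set.mem_ofList]
  have htp : pvTP hg vg = (hg.filter (fun x => decide (x ∈ vg))).foldl max 0 := by
    apply tp_correct
    · exact PySem.List.sorted_pairwise_rev (PySem.Set.ofList (pdiffs hs)) (fun y => y)
    · exact PySem.List.sorted_pairwise_rev (PySem.Set.ofList (pdiffs vs)) (fun y => y)
    · intro x hx
      exact pdiffs_nonneg hs x ((hmem_hg x).mp hx)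
  rw [htp, foldl_if_max]
  have heq : ((pdiffs vs).filter H.contains).foldl max 0
      = (hg.filter (fun x => decide (x ∈ vg))).foldl max 0 := by
    apply foldl_max_mem_congr
    intro x
    simp only [List.mem_filter, PySem.Set.contains_iff, hH, PySem.Set.mem_ofList,
      decide_eq_true_eq, hmem_hg, hmem_vg, List.mem_filter]
    tauto
  rw [heq]
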